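-- pv_equiv track=rewrite | github.com/Mukti-J/Encryption-Algorithm | Vigenere Cipher/VigenereGUI.py | extend_key_autokey
-- ===== SOURCE A (Python) =====
-- def extend_key_autokey(text, key):
--     key = key.lower()
--     key_extended = key
--     for char in text:
--         if len(key_extended) >= len([c for c in text if c.isalpha()]):
--             break
--         if char.isalpha():
--             key_extended += char.lower()
--     # Build the final key string, skipping non-alpha in text
--     result = ''
--     key_index = 0
--     for char in text:
--         if char.isalpha():
--             result += key_extended[key_index]
--             key_index += 1
--         else:
--             result += char
--     return result
-- ===== SOURCE B (Python) =====
-- def extend_key_autokey(text, key):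
--     # Streaming autokey: the lowered key seeds a queue; each alpha char of the
--     # text is enqueued (lowered) and the current front of the queue replaces it.
--     stream = list(key.lower())
--     head = 0
--     out = []
--     for c in text:
--         if c.isalpha():
--             stream.append(c.lower())
--             out.append(stream[head])
--             head += 1
--         else:
--             out.append(c)
--     return ''.join(out)
-- ===== Notes on version B (the rewrite author's own statement) =====
-- stated objective: simpler
-- what changed: B is a single streaming pass with a self-feeding queue: the lowered key seeds the stream, each alpha char of the text is enqueued (lowered) and replaced by the current front, eliminating A's two staged loops, the per-iteration alpha recount and the explicit key truncation.
import Mathlib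
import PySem

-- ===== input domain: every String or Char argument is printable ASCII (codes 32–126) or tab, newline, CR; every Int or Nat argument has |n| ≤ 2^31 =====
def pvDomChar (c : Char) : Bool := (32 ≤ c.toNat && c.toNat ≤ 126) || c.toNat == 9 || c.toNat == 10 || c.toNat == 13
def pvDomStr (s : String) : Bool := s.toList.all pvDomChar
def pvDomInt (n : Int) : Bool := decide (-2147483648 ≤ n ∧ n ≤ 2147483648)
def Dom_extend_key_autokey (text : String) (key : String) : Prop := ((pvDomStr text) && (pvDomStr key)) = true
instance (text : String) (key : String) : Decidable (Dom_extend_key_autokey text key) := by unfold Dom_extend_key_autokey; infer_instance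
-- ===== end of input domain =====

-- B replaces A's two staged loops (per-iteration alpha recount, truncated key extension, then a
-- second interleave pass with a running counter) by one streaming pass over the text with a
-- self-feeding queue; objective: simpler single-pass decomposition, equal output on all inputs.

-- ===== PORT A =====
-- len([c for c in text if c.isalpha()]) — recomputed by A at every loop iteration
def pvCntAlpha (t : List Char) : Nat := (t.filter PySem.Chars.isalpha).length

-- first loop: extend key_extended with lowered alpha chars of text until it covers all alpha chars
def pvALoop1 (t : List Char) : List Char → List Char → List Char
  | [], ke => ke
  | c :: rest, ke =>
    if pvCntAlpha t ≤ ke.length then ke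
    else if PySem.Chars.isalpha c then pvALoop1 t rest (ke ++ [PySem.Chars.lowerChar c])
    else pvALoop1 t rest ke

-- second loop: result/key_index accumulator; key_extended[key_index] is always in range
-- (key_extended ends at least as long as text's alpha count), so Python never raises and the
-- '?' default of the total indexing is unreachable
def pvALoop2 (ke : List Char) : List Char → List Char → Nat → List Char
  | [], res, _ => res
  | c :: rest, res, ki =>
    if PySem.Chars.isalpha c then
      pvALoop2 ke rest (res ++ [(PySem.List.pyGet? ke (ki : Int)).getD '?']) (ki + 1)
    else pvALoop2 ke rest (res ++ [c]) ki

def extend_key_autokey (text : String) (key : String) : String :=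
  let t := text.toList
  let ke := pvALoop1 t t (PySem.Chars.lower key.toList)
  String.ofList (pvALoop2 ke t [] 0)

-- ===== PORT B =====
-- one pass: stream starts as the lowered key; each alpha char is appended lowered and
-- stream[head] replaces it (stream.append always keeps head in range, so the '?' default of
-- the total indexing is unreachable)
def pvBLoop : List Char → List Char → Nat → List Char → List Char
  | [], _, _, out => out
  | c :: rest, stream, head, out =>
    if PySem.Chars.isalpha c then
      let stream' := stream ++ [PySem.Chars.lowerChar c]
      pvBLoop rest stream' (head + 1) (out ++ [(PySem.List.pyGet? stream' (head : Int)).getD '?'])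
    else pvBLoop rest stream head (out ++ [c])

def extend_key_autokey_alt (text : String) (key : String) : String :=
  String.ofList (pvBLoop text.toList (PySem.Chars.lower key.toList) 0 [])

-- ===== PRECONDITION & SPEC =====
def Spec_extend_key_autokey (text : String) (key : String) (out : String) : Prop := out = extend_key_autokey_alt text key
instance (text : String) (key : String) (out : String) : Decidable (Spec_extend_key_autokey text key out) := by unfold Spec_extend_key_autokey; infer_instance

-- ===== CLAIM (what is proved, stated in full; the proofs are below) =====
def Claim_equal_extend_key_autokey : Prop := ∀ (text : String) (key : String), Dom_extend_key_autokey text key → Spec_extend_key_autokey text key (extend_key_autokey text key)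

-- ===== LEMMAS AND PROOFS =====

-- reference shape both loops reduce to: consume one stream char per alpha char of the text
def pvModel : List Char → List Char → List Char
  | _, [] => []
  | s, c :: rest =>
    if PySem.Chars.isalpha c then s.headD '?' :: pvModel s.tail rest
    else c :: pvModel s rest

-- queue-shaped model of B: pending part of the stream, self-fed by the lowered alpha chars
def pvModelQ : List Char → List Char → List Char
  | _, [] => []
  | q, c :: rest =>
    if PySem.Chars.isalpha c then
      (q ++ [PySem.Chars.lowerChar c]).headD '?'
        :: pvModelQ (q ++ [PySem.Chars.lowerChar c]).tail rest
    else c :: pvModelQ q rest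

lemma take_succ_tail (l : List Char) (n : Nat) : (l.take (n+1)).tail = l.tail.take n := by
  cases l <;> simp

-- A's second loop is pvModel on the part of key_extended not yet consumed
lemma pvALoop2_eq (ke : List Char) :
    ∀ (cs res : List Char) (ki : Nat), pvALoop2 ke cs res ki = res ++ pvModel (ke.drop ki) cs := by
  intro cs
  induction cs with
  | nil => intro res ki; simp [pvALoop2, pvModel]
  | cons c rest ih =>
    intro res ki
    by_cases h : PySem.Chars.isalpha c
    · have h2 : (ke.drop ki).tail = ke.drop (ki + 1) := List.tail_drop ..
      simp [pvALoop2, pvModel, h, ih, h2]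
    · simp [pvALoop2, pvModel, h, ih]

-- A's first loop appends exactly the missing prefix of the lowered alpha chars
lemma pvALoop1_eq (t : List Char) :
    ∀ (cs ke : List Char),
      pvALoop1 t cs ke
        = ke ++ ((cs.filter PySem.Chars.isalpha).map PySem.Chars.lowerChar).take
            (pvCntAlpha t - ke.length) := by
  intro cs
  induction cs with
  | nil => intro ke; simp [pvALoop1]
  | cons c rest ih =>
    intro ke
    by_cases hb : pvCntAlpha t ≤ ke.length
    · have : pvCntAlpha t - ke.length = 0 := by omega
      simp [pvALoop1, hb, this]
    · by_cases h : PySem.Chars.isalpha c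
      · have hs : pvCntAlpha t - ke.length = (pvCntAlpha t - (ke.length + 1)) + 1 := by omega
        simp only [pvALoop1, if_neg hb, ih, List.filter_cons, h]
        rw [hs]
        simp [List.take_succ_cons]
      · simp [pvALoop1, hb, h, ih]

-- B's loop is the queue model on the unconsumed part of its stream
lemma pvBLoop_eq :
    ∀ (cs stream out : List Char) (head : Nat), head ≤ stream.length →
      pvBLoop cs stream head out = out ++ pvModelQ (stream.drop head) cs := by
  intro cs
  induction cs with
  | nil => intro stream out head _; simp [pvBLoop, pvModelQ]
  | cons c rest ih =>
    intro stream out head hle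
    by_cases h : PySem.Chars.isalpha c
    · have hdrop : (stream ++ [PySem.Chars.lowerChar c]).drop head
          = stream.drop head ++ [PySem.Chars.lowerChar c] := List.drop_append_of_le_length hle
      have hget : (PySem.List.pyGet? (stream ++ [PySem.Chars.lowerChar c]) (head : Int)).getD '?'
          = (stream.drop head ++ [PySem.Chars.lowerChar c]).headD '?' := by
        rw [PySem.List.pyGet?_natCast, List.headD_eq_head?_getD, List.head?_eq_getElem?,
          ← hdrop, List.getElem?_drop, Nat.add_zero]
      have htl : (stream ++ [PySem.Chars.lowerChar c]).drop (head + 1)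
          = (stream.drop head ++ [PySem.Chars.lowerChar c]).tail := by
        rw [hdrop.symm, ← List.tail_drop]
      have hle' : head + 1 ≤ (stream ++ [PySem.Chars.lowerChar c]).length := by
        simp; omega
      simp only [pvBLoop, if_pos h, pvModelQ]
      rw [ih _ _ _ hle', hget, htl]
      simp
    · simp only [pvBLoop, if_neg h, pvModelQ]
      rw [ih _ _ _ hle]
      simp

-- the queue model equals pvModel on the full stream (pending ++ future lowered alphas)
lemma pvModelQ_eq_pvModel :
    ∀ (cs q : List Char),
      pvModelQ q cs = pvModel (q ++ (cs.filter PySem.Chars.isalpha).map PySem.Chars.lowerChar) cs := by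
  intro cs
  induction cs with
  | nil => intro q; simp [pvModelQ, pvModel]
  | cons c rest ih =>
    intro q
    by_cases h : PySem.Chars.isalpha c
    · have hne : q ++ [PySem.Chars.lowerChar c] ≠ [] := by simp
      have hassoc : q ++ PySem.Chars.lowerChar c ::
            (rest.filter PySem.Chars.isalpha).map PySem.Chars.lowerChar
          = (q ++ [PySem.Chars.lowerChar c])
            ++ (rest.filter PySem.Chars.isalpha).map PySem.Chars.lowerChar := by
        simp
      simp only [pvModelQ, pvModel, List.filter_cons, h, if_pos, List.map_cons, hassoc]
      rw [ih, List.tail_append_of_ne_nil hne, List.headD_eq_head?_getD,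
        List.headD_eq_head?_getD, List.head?_append_of_ne_nil _ hne]
    · simp only [pvModelQ, pvModel, List.filter_cons, h]
      simp only [Bool.false_eq_true, if_false]
      rw [ih]

-- pvModel only reads the first (alpha count) chars of the stream
lemma pvModel_congr :
    ∀ (cs s1 s2 : List Char),
      s1.take (cs.filter PySem.Chars.isalpha).length = s2.take (cs.filter PySem.Chars.isalpha).length →
      pvModel s1 cs = pvModel s2 cs := by
  intro cs
  induction cs with
  | nil => intro s1 s2 _; simp [pvModel]
  | cons c rest ih =>
    intro s1 s2 hts
    by_cases h : PySem.Chars.isalpha c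
    · simp only [List.filter_cons, h, if_pos, List.length_cons] at hts
      have hh : s1.head? = s2.head? := by
        have := congrArg List.head? hts
        simpa [List.head?_take] using this
      have ht : s1.tail.take (rest.filter PySem.Chars.isalpha).length
          = s2.tail.take (rest.filter PySem.Chars.isalpha).length := by
        have := congrArg List.tail hts
        simpa [take_succ_tail] using this
      simp [pvModel, h, List.headD_eq_head?_getD, hh, ih _ _ ht]
    · simp only [List.filter_cons, h] at hts
      simp [pvModel, h, ih _ _ hts]

-- ===== VERDICT (by name: the statement is the Claim_ definition above) =====
theorem extend_key_autokey_spec : Claim_equal_extend_key_autokey := by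
  intro text key _
  unfold Spec_extend_key_autokey extend_key_autokey extend_key_autokey_alt
  simp only
  set t := text.toList with ht
  set k := PySem.Chars.lower key.toList with hk
  set m := (t.filter PySem.Chars.isalpha).map PySem.Chars.lowerChar with hm
  -- A side
  rw [pvALoop2_eq, List.drop_zero, pvALoop1_eq]
  -- B side
  rw [pvBLoop_eq _ _ _ _ (Nat.zero_le _), List.drop_zero, pvModelQ_eq_pvModel, ← hm]
  simp only [List.nil_append]
  congr 1
  apply pvModel_congr
  have hcnt : (t.filter PySem.Chars.isalpha).length = pvCntAlpha t := rfl
  rw [hcnt, List.take_append, List.take_append, List.take_take, Nat.min_self]
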